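-- pv_equiv track=rewrite | github.com/bunnysunny24/Logistics | backend/models/enchanced_rag_model.py | _is_causal_query
-- ===== SOURCE A (Python) =====
-- def _is_causal_query(query):
--     """Determine if a query is asking for causal reasoning"""
--     causal_terms = [
--         "why", "cause", "reason", "because", "due to", "resulted in",
--         "led to", "root cause", "trigger", "caused by", "explain why",
--         "what caused", "how did", "what led to"
--     ]
--
--     query_lower = query.lower()
--     return any(term in query_lower for term in causal_terms)
-- ===== SOURCE B (Python) =====
-- _CAUSAL_TERMS = (
--     "why", "cause", "reason", "because", "due to", "resulted in",
--     "led to", "root cause", "trigger", "caused by", "explain why",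
--     "what caused", "how did", "what led to"
-- )
--
-- def _is_causal_query(query):
--     """Determine if a query is asking for causal reasoning"""
--     q = query.lower()
--     # single left-to-right scan: at each position test all terms as prefixes
--     return any(q.startswith(_CAUSAL_TERMS, i) for i in range(len(q) + 1))
-- ===== Notes on version B (the rewrite author's own statement) =====
-- stated objective: alternative
-- what changed: Replaces the per-term substring-membership scans with a single left-to-right scan over the lowercased query that tests the whole term tuple as prefixes at each position (str.startswith with a tuple and a start index).
import Mathlib
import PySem

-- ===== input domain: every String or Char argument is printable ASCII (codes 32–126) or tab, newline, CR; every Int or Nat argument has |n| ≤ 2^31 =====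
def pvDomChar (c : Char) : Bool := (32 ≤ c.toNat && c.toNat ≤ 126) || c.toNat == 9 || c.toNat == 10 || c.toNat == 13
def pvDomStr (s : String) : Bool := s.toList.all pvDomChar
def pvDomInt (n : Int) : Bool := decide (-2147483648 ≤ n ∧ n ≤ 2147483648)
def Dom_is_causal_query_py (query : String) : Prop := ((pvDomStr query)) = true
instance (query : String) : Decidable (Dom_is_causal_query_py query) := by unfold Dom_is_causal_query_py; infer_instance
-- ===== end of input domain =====

-- B replaces the per-term membership scans with one left-to-right scan testing every term as a prefix at each position (alternative, same cost).

-- the causal term list shared by both sources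
def causalTerms : List String :=
  ["why", "cause", "reason", "because", "due to", "resulted in",
   "led to", "root cause", "trigger", "caused by", "explain why",
   "what caused", "how did", "what led to"]

-- ===== PORT A =====
def is_causal_query_py (query : String) : Bool :=
  let query_lower := PySem.Str.lower query
  causalTerms.any (fun term => PySem.Str.isIn term query_lower)

-- ===== PORT B =====
def is_causal_query_py_alt (query : String) : Bool :=
  let q := PySem.Chars.lower query.toList
  (List.range (q.length + 1)).any
    (fun i => causalTerms.any (fun term => term.toList.isPrefixOf (q.drop i)))

-- ===== PRECONDITION & SPEC =====
def Spec_is_causal_query_py (query : String) (out : Bool) : Prop := out = is_causal_query_py_alt query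
instance (query : String) (out : Bool) : Decidable (Spec_is_causal_query_py query out) := by unfold Spec_is_causal_query_py; infer_instance

-- ===== CLAIM (what is proved, stated in full; the proofs are below) =====
def Claim_equal_is_causal_query_py : Prop := ∀ (query : String), Dom_is_causal_query_py query → Spec_is_causal_query_py query (is_causal_query_py query)

-- ===== LEMMAS AND PROOFS =====

-- 'sub in s' holds iff sub is a prefix of some drop with index bounded by s.length
theorem isIn_iff_exists_prefix_lt (sub s : List Char) :
    PySem.Chars.isIn sub s = true ↔ ∃ i < s.length + 1, sub.isPrefixOf (s.drop i) = true := by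
  rw [← PySem.Chars.exists_prefix_drop_iff_isIn]
  constructor
  · rintro ⟨j, hj⟩
    by_cases h : j ≤ s.length
    · exact ⟨j, by omega, List.isPrefixOf_iff_prefix.mpr hj⟩
    · refine ⟨s.length, by omega, List.isPrefixOf_iff_prefix.mpr ?_⟩
      rw [List.drop_eq_nil_of_le (by omega)] at hj
      rw [List.drop_length]; exact hj
  · rintro ⟨i, _, hi⟩
    exact ⟨i, List.isPrefixOf_iff_prefix.mp hi⟩

-- ===== VERDICT (by name: the statement is the Claim_ definition above) =====
theorem is_causal_query_py_spec : Claim_equal_is_causal_query_py := by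
  intro query _
  unfold Spec_is_causal_query_py is_causal_query_py is_causal_query_py_alt
  simp only [PySem.Str.isIn_eq, PySem.Str.toList_lower]
  set q := PySem.Chars.lower query.toList with hq
  rw [Bool.eq_iff_iff]
  simp only [List.any_eq_true, List.mem_range]
  constructor
  · rintro ⟨t, ht, hin⟩
    obtain ⟨i, hi, hp⟩ := (isIn_iff_exists_prefix_lt t.toList q).mp hin
    exact ⟨i, hi, t, ht, hp⟩
  · rintro ⟨i, hi, t, ht, hp⟩
    exact ⟨t, ht, (isIn_iff_exists_prefix_lt t.toList q).mpr ⟨i, hi, hp⟩⟩
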